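-- pv_equiv track=rewrite | github.com/lukewhite32/Advent-of-Code | advent6.py | isRepeat
-- ===== SOURCE A (Python) =====
-- def createList(string):
--     tmpLst = []
--     for x in range(len(string)):
--         tmpLst.append(string[x])
--     return tmpLst
--
-- def isRepeat(data):
--     for x in range(14):
--         dataCheck = createList(data)
--         del(dataCheck[x])
--         if data[x] in dataCheck:
--             return True
--         else:
--             pass
--     return False
-- ===== SOURCE B (Python) =====
-- def isRepeat(data):
--     count = {}
--     for c in data:
--         count[c] = count.get(c, 0) + 1
--     for x in range(14):
--         if count[data[x]] > 1:
--             return True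
--     return False
-- ===== Notes on version B (the rewrite author's own statement) =====
-- stated objective: alternative
-- what changed: B builds one frequency table of the whole string in a single pass and checks the 14 positions with O(1) lookups, instead of A's per-position full list rebuild plus membership scan.
import Mathlib
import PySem

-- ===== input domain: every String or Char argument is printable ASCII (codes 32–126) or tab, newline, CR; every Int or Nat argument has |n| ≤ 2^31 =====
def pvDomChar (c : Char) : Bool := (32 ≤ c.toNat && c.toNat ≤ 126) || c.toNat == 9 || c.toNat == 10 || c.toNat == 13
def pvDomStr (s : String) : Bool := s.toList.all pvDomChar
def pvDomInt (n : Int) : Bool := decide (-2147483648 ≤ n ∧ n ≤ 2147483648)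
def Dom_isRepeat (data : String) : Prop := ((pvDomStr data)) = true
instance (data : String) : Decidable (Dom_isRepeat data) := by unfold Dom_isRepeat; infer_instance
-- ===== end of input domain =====

-- B replaces A's per-position list rebuild + membership scan by one frequency table built in a single pass.

-- ===== PORT A =====
def createList (string : String) : List Char :=
  (PySem.List.pyRange 0 (PySem.Str.len string) 1).foldl
    (fun tmpLst x => tmpLst ++ [PySem.List.pyGetD string.toList x ' ']) []

def isRepeatLoopA (data : String) : List Int → Bool
  | [] => false
  | x :: rest =>
    match PySem.List.pop? (createList data) x with
    | none => false  -- IndexError from del(dataCheck[x]); outside Pre_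
    | some (_, dataCheck) =>
      match PySem.List.pyGet? data.toList x with
      | none => false  -- IndexError from data[x]; outside Pre_
      | some c => if dataCheck.contains c then true else isRepeatLoopA data rest

def isRepeat (data : String) : Bool :=
  isRepeatLoopA data (PySem.List.pyRange 0 14 1)

-- ===== PORT B =====
def isRepeatLoopB (count : PySem.Dict Char Int) (data : String) : List Int → Bool
  | [] => false
  | x :: rest =>
    match PySem.List.pyGet? data.toList x with
    | none => false  -- IndexError from data[x]; outside Pre_
    | some c =>
      match count.get? c with
      | none => false  -- KeyError; unreachable, every data[x] was counted
      | some k => if k > 1 then true else isRepeatLoopB count data rest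

def isRepeat_alt (data : String) : Bool :=
  let count := data.toList.foldl (fun d c => d.insert c (d.getD c 0 + 1)) PySem.Dict.empty
  isRepeatLoopB count data (PySem.List.pyRange 0 14 1)

-- ===== PRECONDITION & SPEC =====
-- A raises IndexError iff the string is shorter than 14 AND has no repeated character
-- (with a repeat it returns True before running past the end).
def Pre_isRepeat (data : String) : Prop := 14 ≤ data.toList.length ∨ ¬ data.toList.Nodup
instance (data : String) : Decidable (Pre_isRepeat data) := by unfold Pre_isRepeat; infer_instance
def pvWitness_isRepeat : String := "abcdefghijklmn"

def Spec_isRepeat (data : String) (out : Bool) : Prop := out = isRepeat_alt data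
instance (data : String) (out : Bool) : Decidable (Spec_isRepeat data out) := by unfold Spec_isRepeat; infer_instance

-- ===== CLAIM (what is proved, stated in full; the proofs are below) =====
def Claim_equal_isRepeat : Prop := ∀ (data : String), Dom_isRepeat data → Pre_isRepeat data → Spec_isRepeat data (isRepeat data)

-- ===== LEMMAS AND PROOFS =====
theorem createList_eq (s : String) : createList s = s.toList := by
  unfold createList
  have h : PySem.Str.len s = (s.toList.length : Int) := by simp
  rw [h, PySem.List.foldl_pyRange_zero_pyGetD' s.toList ' ' (fun acc c => acc ++ [c]) []]
  have hm := PySem.List.foldl_append_singleton_eq_map (id : Char → Char) s.toList []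
  simp only [id_eq, List.map_id, List.nil_append] at hm
  exact hm

theorem pop?_none_of_ge (xs : List Char) (i : Int) (h0 : 0 ≤ i) (h : (xs.length : Int) ≤ i) :
    PySem.List.pop? xs i = none := by
  unfold PySem.List.pop? PySem.List.pyIdx?
  split <;> split <;> simp_all
  omega

theorem loops_eq (data : String) (xs : List Int)
    (hxs : ∀ x ∈ xs, 0 ≤ x) :
    isRepeatLoopA data xs =
      isRepeatLoopB (data.toList.foldl (fun d c => d.insert c (d.getD c 0 + 1)) PySem.Dict.empty) data xs := by
  induction xs with
  | nil => rfl
  | cons x rest ih =>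
    have hx0 := hxs x (List.mem_cons_self ..)
    set l := data.toList with hl
    have hxn : x = (x.toNat : Int) := (Int.toNat_of_nonneg hx0).symm
    by_cases hn : x.toNat < l.length
    case neg =>
      have hge : (l.length : Int) ≤ x := by omega
      have hpop : PySem.List.pop? (createList data) x = none := by
        rw [createList_eq]
        exact pop?_none_of_ge l x hx0 hge
      have hget : PySem.List.pyGet? l x = none := by
        rw [PySem.List.pyGet?_eq_none_iff]
        unfold PySem.Raise.InRange
        omega
      rw [isRepeatLoopA, isRepeatLoopB, hpop, hget]
    rw [isRepeatLoopA, isRepeatLoopB, createList_eq, PySem.Dict.foldl_insert_getD_add_one_eq_counter,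
      hxn, PySem.List.pop?_natCast l x.toNat hn, PySem.List.pyGet?_natCast,
      List.getElem?_eq_getElem hn]
    dsimp only
    have hmem : l[x.toNat] ∈ l := l.getElem_mem hn
    have hcnt1 : 0 < List.count l[x.toNat] l := List.count_pos_iff.mpr hmem
    have herase : List.count l[x.toNat] (l.eraseIdx x.toNat) = List.count l[x.toNat] l - 1 := by
      rw [← (List.erase_getElem hn).count_eq, List.count_erase_self]
    have hcond : (l.eraseIdx x.toNat).contains l[x.toNat] = decide (1 < List.count l[x.toNat] l) := by
      by_cases hc : 1 < List.count l[x.toNat] l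
      · simp only [hc, decide_true, List.contains_iff_mem]
        exact List.count_pos_iff.mp (by omega)
      · simp only [hc, decide_false]
        have : l[x.toNat] ∉ l.eraseIdx x.toNat := by
          intro hm
          have := List.count_pos_iff.mpr hm
          omega
        simpa using this
    have hcontains : (PySem.Dict.counter l).contains l[x.toNat] = true := by
      rw [PySem.Dict.contains_counter]
      simp [hmem]
    cases hg : (PySem.Dict.counter l).get? l[x.toNat] with
    | none =>
      rw [(PySem.Dict.get?_eq_none_iff_contains ..).mp hg] at hcontains
      cases hcontains
    | some k =>
      dsimp only
      have hk : k = (List.count l[x.toNat] l : Int) := by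
        have := PySem.Dict.getD_counter l l[x.toNat]
        simp only [PySem.Dict.getD, hg, Option.getD_some] at this
        exact this
      simp only [hcond, hk]
      by_cases hc : 1 < List.count l[x.toNat] l
      · have hc' : (1 : Int) < (List.count l[x.toNat] l : Int) := by exact_mod_cast hc
        simp [hc, hc']
      · have hc' : ¬ (1 : Int) < (List.count l[x.toNat] l : Int) := by exact_mod_cast hc
        simp only [hc, decide_false, Bool.false_eq_true, if_false, if_neg hc']
        exact ih (fun y hy => hxs y (List.mem_cons_of_mem _ hy))


-- ===== VERDICT (by name: the statement is the Claim_ definition above) =====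
theorem isRepeat_spec : Claim_equal_isRepeat := by
  intro data _ _
  unfold Spec_isRepeat isRepeat isRepeat_alt
  exact loops_eq data _ (fun x hx => (PySem.List.mem_pyRange_one.mp hx).1)
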